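-- pv_equiv track=rewrite | github.com/RPINerd/fqTooling | simples.py | ret_od2_repr
-- ===== SOURCE A (Python) =====
-- def ret_od2_repr(seq):
--     """
--     Return Oligodesign2 representation of an IDT sequence
--
--     :param str: seq: IDT sequence
--     :rtype: str
--     """
--
--     is_LNA = False
--     od2_seq = []
--     for i, a in enumerate(seq):
--         assert a.upper() == a, "IDT bases should be upper case"
--         # Next base is an LNA base
--         if a == "+":
--             is_LNA = True
--             continue
--         if is_LNA:
--             od2_seq.append(a)
--         else:
--             od2_seq.append(a.lower())
--         is_LNA = False
--
--     return "".join(od2_seq)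
-- ===== SOURCE B (Python) =====
-- def ret_od2_repr(seq):
--     """
--     Return Oligodesign2 representation of an IDT sequence
--
--     :param str: seq: IDT sequence
--     :rtype: str
--     """
--     assert seq == seq.upper(), "IDT bases should be upper case"
--     segs = seq.split("+")
--     pieces = [segs[0].lower()]
--     for seg in segs[1:]:
--         pieces.append(seg[:1] + seg[1:].lower())
--     return "".join(pieces)
-- ===== Notes on version B (the rewrite author's own statement) =====
-- stated objective: simpler
-- what changed: Replaces the per-character loop with a stateful is_LNA flag by a split on '+': lowercase the first segment, and for each later segment keep its first character and lowercase the rest.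
import Mathlib
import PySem

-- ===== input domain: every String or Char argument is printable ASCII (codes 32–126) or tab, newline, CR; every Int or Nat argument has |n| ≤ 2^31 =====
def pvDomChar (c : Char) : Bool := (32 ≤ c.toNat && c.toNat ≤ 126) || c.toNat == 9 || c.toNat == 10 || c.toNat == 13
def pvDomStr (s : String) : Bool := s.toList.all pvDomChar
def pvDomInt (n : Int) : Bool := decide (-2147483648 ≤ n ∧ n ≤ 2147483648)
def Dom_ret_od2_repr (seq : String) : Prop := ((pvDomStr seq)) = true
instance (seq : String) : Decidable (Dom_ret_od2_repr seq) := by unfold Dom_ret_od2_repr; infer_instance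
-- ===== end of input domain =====

-- B replaces A's per-character loop with an is_LNA flag by a split on '+' (segment-based pass); objective: simpler.

-- ===== PORT A =====
-- literal port of A's loop: state = (is_LNA, od2_seq); the assert is handled by Pre_ below
def ret_od2_repr (seq : String) : String :=
  let r := seq.toList.foldl
    (fun (st : Bool × List Char) (a : Char) =>
      if a = '+' then (true, st.2)
      else if st.1 then (false, st.2 ++ [a])
      else (false, st.2 ++ [PySem.Chars.lowerChar a]))
    (false, [])
  String.ofList r.2

-- ===== PORT B =====
-- literal port of Source B: split on "+", lowercase segs[0], keep seg[:1] and lowercase seg[1:] for the rest, join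
def ret_od2_repr_alt (seq : String) : String :=
  let segs := PySem.Chars.splitOn seq.toList ['+']
  let pieces :=
    match segs with
    | [] => []  -- unreachable: str.split never returns an empty list
    | s0 :: rest =>
        PySem.Chars.lower s0 ::
          rest.map (fun seg => seg.take 1 ++ PySem.Chars.lower (seg.drop 1))
  String.ofList (PySem.Chars.join [] pieces)

-- ===== PRECONDITION & SPEC =====
-- Pre_ excludes exactly the inputs on which Python A raises AssertionError: a character that is not its own upper-case form (an ASCII lowercase letter)
def Pre_ret_od2_repr (seq : String) : Prop :=
  seq.toList.all (fun c => PySem.Chars.upperChar c == c) = true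
instance (seq : String) : Decidable (Pre_ret_od2_repr seq) := by unfold Pre_ret_od2_repr; infer_instance
def pvWitness_ret_od2_repr : String := "A+TG+C"

def Spec_ret_od2_repr (seq : String) (out : String) : Prop := out = ret_od2_repr_alt seq
instance (seq : String) (out : String) : Decidable (Spec_ret_od2_repr seq out) := by unfold Spec_ret_od2_repr; infer_instance

-- ===== CLAIM (what is proved, stated in full; the proofs are below) =====
def Claim_equal_ret_od2_repr : Prop := ∀ (seq : String), Dom_ret_od2_repr seq → Pre_ret_od2_repr seq → Spec_ret_od2_repr seq (ret_od2_repr seq)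

-- ===== LEMMAS AND PROOFS =====

-- pure recursive characterisation of splitting on '+'
def sp : List Char → List (List Char)
  | [] => [[]]
  | c :: cs => if c = '+' then [] :: sp cs else (sp cs).modifyHead (c :: ·)

theorem sp_ne_nil (cs : List Char) : sp cs ≠ [] := by
  induction cs with
  | nil => simp [sp]
  | cons c cs ih =>
    simp only [sp]
    split
    · simp
    · cases h : sp cs with
      | nil => exact absurd h ih
      | cons a b => simp [List.modifyHead]

theorem go_eq_sp (fuel : Nat) (l cur : List Char) (acc : List (List Char))
    (h : l.length ≤ fuel) :
    PySem.Chars.splitOn.go ['+'] fuel l cur acc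
      = acc.reverse ++ (sp l).modifyHead (cur.reverse ++ ·) := by
  induction fuel generalizing l cur acc with
  | zero =>
    have hl : l = [] := List.eq_nil_of_length_eq_zero (Nat.le_zero.mp h)
    subst hl
    simp [PySem.Chars.splitOn.go, sp, List.modifyHead]
  | succ fuel ih =>
    cases l with
    | nil => simp [PySem.Chars.splitOn.go, sp, List.modifyHead]
    | cons c rest =>
      rw [PySem.Chars.splitOn.go]
      by_cases hc : c = '+'
      · subst hc
        have hpre : List.isPrefixOf ['+'] ('+' :: rest) = true := by
          simp [List.isPrefixOf]
        simp only [hpre, if_true, List.length_cons, List.drop_succ_cons,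
          List.length_nil, List.drop_zero]
        rw [ih rest [] (cur.reverse :: acc) (by simpa using Nat.lt_succ_iff.mp (by simpa using h))]
        obtain ⟨h0, t0, ht⟩ : ∃ h0 t0, sp rest = h0 :: t0 := by
          cases hsp : sp rest with
          | nil => exact absurd hsp (sp_ne_nil rest)
          | cons a b => exact ⟨a, b, rfl⟩
        simp [sp, ht, List.modifyHead]
      · have hpre : List.isPrefixOf ['+'] (c :: rest) = false := by
          simp [List.isPrefixOf]
          exact fun e => hc e.symm
        simp only [hpre, Bool.false_eq_true, if_false]
        rw [ih rest (c :: cur) acc (by simpa using Nat.lt_succ_iff.mp (by simpa using h))]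
        obtain ⟨h0, t0, ht⟩ : ∃ h0 t0, sp rest = h0 :: t0 := by
          cases hsp : sp rest with
          | nil => exact absurd hsp (sp_ne_nil rest)
          | cons a b => exact ⟨a, b, rfl⟩
        simp [sp, hc, ht, List.modifyHead]

theorem splitOn_eq_sp (l : List Char) :
    PySem.Chars.splitOn l ['+'] = sp l := by
  obtain ⟨h0, t0, ht⟩ : ∃ h0 t0, sp l = h0 :: t0 := by
    cases hsp : sp l with
    | nil => exact absurd hsp (sp_ne_nil l)
    | cons a b => exact ⟨a, b, rfl⟩
  have := go_eq_sp (l.length + 1) l [] [] (Nat.le_succ _)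
  simp only [ht, List.modifyHead, List.reverse_nil, List.nil_append] at this
  simpa [PySem.Chars.splitOn, ht] using this

-- the value A's loop produces, as a recursive function of the remaining input and the flag
def outA (b : Bool) : List Char → List Char
  | [] => []
  | c :: cs =>
      if c = '+' then outA true cs
      else (if b then c else PySem.Chars.lowerChar c) :: outA false cs

theorem foldA_eq_outA (cs : List Char) (b : Bool) (acc : List Char) :
    (cs.foldl
      (fun (st : Bool × List Char) (a : Char) =>
        if a = '+' then (true, st.2)
        else if st.1 then (false, st.2 ++ [a])
        else (false, st.2 ++ [PySem.Chars.lowerChar a]))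
      (b, acc)).2 = acc ++ outA b cs := by
  induction cs generalizing b acc with
  | nil => simp [outA]
  | cons c cs ih =>
    by_cases hc : c = '+'
    · simp [List.foldl_cons, hc, outA, ih]
    · cases b <;> simp [List.foldl_cons, hc, outA, ih]

def keepPiece (seg : List Char) : List Char := seg.take 1 ++ PySem.Chars.lower (seg.drop 1)

theorem outA_eq_pieces (cs : List Char) :
    ∀ s0 rest, sp cs = s0 :: rest →
      outA false cs = PySem.Chars.lower s0 ++ (rest.map keepPiece).flatten ∧
      outA true cs = keepPiece s0 ++ (rest.map keepPiece).flatten := by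
  induction cs with
  | nil =>
    intro s0 rest h
    simp only [sp] at h
    obtain ⟨h1, h2⟩ := List.cons.inj h
    subst h1; subst h2
    simp [outA, keepPiece, PySem.Chars.lower]
  | cons c cs ih =>
    intro s0 rest h
    obtain ⟨h0, t0, ht⟩ : ∃ h0 t0, sp cs = h0 :: t0 := by
      cases hsp : sp cs with
      | nil => exact absurd hsp (sp_ne_nil cs)
      | cons a b => exact ⟨a, b, rfl⟩
    obtain ⟨ihf, iht⟩ := ih h0 t0 ht
    by_cases hc : c = '+'
    · simp only [sp, hc] at h
      obtain ⟨h1, h2⟩ := List.cons.inj h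
      subst h1; subst h2
      constructor
      · simpa [outA, hc, ht, PySem.Chars.lower] using iht
      · simpa [outA, hc, ht, keepPiece, PySem.Chars.lower] using iht
    · simp only [sp, hc, if_false, ht, List.modifyHead] at h
      obtain ⟨h1, h2⟩ := List.cons.inj h
      subst h1; subst h2
      constructor
      · simp [outA, hc, ihf, PySem.Chars.lower]
      · simp [outA, hc, ihf, keepPiece, PySem.Chars.lower]

theorem join_nil_eq_flatten (ps : List (List Char)) :
    PySem.Chars.join [] ps = ps.flatten := by
  induction ps with
  | nil => simp [PySem.Chars.join_nil]
  | cons p ps ih =>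
    cases ps with
    | nil => simp [PySem.Chars.join_singleton]
    | cons q rest => simp [PySem.Chars.join_cons_cons, ih]

-- ===== VERDICT (by name: the statement is the Claim_ definition above) =====
theorem ret_od2_repr_spec : Claim_equal_ret_od2_repr := by
  intro seq _ _
  show ret_od2_repr seq = ret_od2_repr_alt seq
  unfold ret_od2_repr ret_od2_repr_alt
  obtain ⟨s0, rest, hsp⟩ : ∃ s0 rest, sp seq.toList = s0 :: rest := by
    cases hsp : sp seq.toList with
    | nil => exact absurd hsp (sp_ne_nil seq.toList)
    | cons a b => exact ⟨a, b, rfl⟩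
  obtain ⟨hf, _⟩ := outA_eq_pieces seq.toList s0 rest hsp
  simp only [splitOn_eq_sp, hsp, foldA_eq_outA, List.nil_append,
    join_nil_eq_flatten, List.flatten_cons]
  rw [hf]
  have hkp : keepPiece = fun seg => seg.take 1 ++ PySem.Chars.lower (seg.drop 1) := by
    funext seg
    rfl
  rw [hkp]
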